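-- pv_equiv track=rewrite | github.com/ictxiangxin/paradox | paradox/neural_network/convolutional_neural_network/compute.py | __array_key_traversal
-- ===== SOURCE A (Python) =====
-- from functools import reduce
--
-- def __array_key_traversal(array_shape):
--     scale = reduce(lambda a, b: a * b, array_shape)
--     for i in range(scale):
--         key = [0] * len(array_shape)
--         key[-1] = i
--         for r in range(len(array_shape) - 1, -1, -1):
--             if key[r] >= array_shape[r]:
--                 key[r - 1] = key[r] // array_shape[r]
--                 key[r] %= array_shape[r]
--             else:
--                 break
--         yield tuple(key)
-- ===== SOURCE B (Python) =====
-- def __array_key_traversal(array_shape):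
--     # Row-major enumeration built dimension by dimension: extend every current
--     # prefix with each value of the next dimension's range.  A dimension without
--     # valid indices means there is nothing to enumerate.
--     if any(size <= 0 for size in array_shape):
--         return
--     prefixes = [()]
--     for size in array_shape:
--         prefixes = [prefix + (v,) for prefix in prefixes for v in range(size)]
--     yield from prefixes
-- ===== Notes on version B (the rewrite author's own statement) =====
-- stated objective: idiomatic
-- what changed: Replaces the mixed-radix carry counter (enumerate i in range(prod) and normalize a fresh zeroed digit vector by repeated //,% carries) with a dimension-by-dimension prefix-extension build of the row-major tuples, short-circuiting shapes that contain an empty dimension.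
-- intended difference: On shapes containing a negative dimension whose total product is positive (e.g. [-2,-3]), A's carry arithmetic emits prod-many accidental tuples with negative entries, while B yields nothing, the intended result for a shape with no valid indices. — e.g. on __array_key_traversal([-2, -3]): A returns [[0, 0], [-1, 0], [-1, 0], [-1, 0], [0, 1], [0, 1]], B returns []
import Mathlib
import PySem

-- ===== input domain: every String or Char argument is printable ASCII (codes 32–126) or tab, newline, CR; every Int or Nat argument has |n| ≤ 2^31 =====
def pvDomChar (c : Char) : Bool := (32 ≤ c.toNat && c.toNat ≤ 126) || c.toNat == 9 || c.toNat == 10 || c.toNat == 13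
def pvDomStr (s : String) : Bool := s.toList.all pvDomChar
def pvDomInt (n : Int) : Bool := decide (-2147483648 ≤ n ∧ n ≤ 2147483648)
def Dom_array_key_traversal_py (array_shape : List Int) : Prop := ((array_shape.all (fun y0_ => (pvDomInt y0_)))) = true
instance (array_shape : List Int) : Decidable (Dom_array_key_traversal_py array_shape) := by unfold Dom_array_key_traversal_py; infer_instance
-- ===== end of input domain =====

-- B replaces A's mixed-radix carry counter by a dimension-by-dimension prefix-extension
-- build of the same row-major index tuples (objective: idiomatic, not faster).

-- ===== PORT A =====
-- reduce(lambda a, b: a * b, array_shape); Python raises TypeError on [], excluded by Pre_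
def pvReduceMul : List Int → Int
  | [] => 0
  | a :: rest => rest.foldl (· * ·) a

-- the inner 'for r in range(len-1, -1, -1)' loop with its early break;
-- key[r]/key[r-1]/array_shape[r] accesses are always in range when the list is
-- nonempty (negative indices wrap via pySetD/pyGetD exactly as in Python)
def pvCarry (shape : List Int) : List Int → List Int → List Int
  | key, [] => key
  | key, r :: rest =>
    if PySem.List.pyGetD shape r 0 ≤ PySem.List.pyGetD key r 0 then
      let key1 := PySem.List.pySetD key (r - 1)
        (PySem.Int.floordiv (PySem.List.pyGetD key r 0) (PySem.List.pyGetD shape r 0))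
      let key2 := PySem.List.pySetD key1 r
        (PySem.Int.mod (PySem.List.pyGetD key1 r 0) (PySem.List.pyGetD shape r 0))
      pvCarry shape key2 rest
    else key

def array_key_traversal_py (array_shape : List Int) : List (List Int) :=
  let scale := pvReduceMul array_shape
  (PySem.List.pyRange 0 scale 1).map (fun i =>
    let key0 := List.replicate array_shape.length (0 : Int)
    let key1 := PySem.List.pySetD key0 (-1) i
    pvCarry array_shape key1
      (PySem.List.pyRange ((array_shape.length : Int) - 1) (-1) (-1)))

-- ===== PORT B =====
-- prefixes = [prefix + (v,) for prefix in prefixes for v in range(size)]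
def pvExtend (prefixes : List (List Int)) (size : Int) : List (List Int) :=
  prefixes.flatMap (fun p => (PySem.List.pyRange 0 size 1).map (fun v => p ++ [v]))

def array_key_traversal_py_alt (array_shape : List Int) : List (List Int) :=
  if array_shape.any (fun size => size ≤ 0) then []
  else array_shape.foldl pvExtend [[]]

-- ===== PRECONDITION & SPEC =====
-- Pre_ excludes only the empty shape, on which A's reduce raises TypeError when the
-- generator is consumed (B instead yields the single empty tuple there).
def Pre_array_key_traversal_py (array_shape : List Int) : Prop := array_shape ≠ []
instance (array_shape : List Int) : Decidable (Pre_array_key_traversal_py array_shape) := by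
  unfold Pre_array_key_traversal_py; infer_instance

def pvWitness_array_key_traversal_py : List Int := [2, 3]

-- On shapes containing a negative dimension whose total product is positive (e.g. [-2,-3]),
-- A's carry arithmetic emits prod-many accidental tuples with negative entries, while B
-- yields nothing, the intended result for a shape with no valid indices.
def D_array_key_traversal_py (array_shape : List Int) : Prop :=
  (∃ x ∈ array_shape, x < 0) ∧ 0 < array_shape.prod
instance (array_shape : List Int) : Decidable (D_array_key_traversal_py array_shape) := by
  unfold D_array_key_traversal_py; infer_instance

def Spec_array_key_traversal_py (array_shape : List Int) (out : List (List Int)) : Prop :=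
  ¬ D_array_key_traversal_py array_shape → out = array_key_traversal_py_alt array_shape
instance (array_shape : List Int) (out : List (List Int)) :
    Decidable (Spec_array_key_traversal_py array_shape out) := by
  unfold Spec_array_key_traversal_py; infer_instance

def pvDiffWitness_array_key_traversal_py : List Int := [-2, -3]
def pvDiffWitnessOut_array_key_traversal_py : (List (List Int)) × (List (List Int)) :=
  ([[0, 0], [-1, 0], [-1, 0], [-1, 0], [0, 1], [0, 1]], [])

-- ===== CLAIM (what is proved, stated in full; the proofs are below) =====
def Claim_unchanged_array_key_traversal_py : Prop := ∀ (array_shape : List Int), Dom_array_key_traversal_py array_shape → Pre_array_key_traversal_py array_shape → Spec_array_key_traversal_py array_shape (array_key_traversal_py array_shape)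
def Claim_changed_array_key_traversal_py : Prop := Dom_array_key_traversal_py (pvDiffWitness_array_key_traversal_py) ∧ Pre_array_key_traversal_py (pvDiffWitness_array_key_traversal_py) ∧ D_array_key_traversal_py (pvDiffWitness_array_key_traversal_py) ∧ array_key_traversal_py (pvDiffWitness_array_key_traversal_py) = pvDiffWitnessOut_array_key_traversal_py.1 ∧ array_key_traversal_py_alt (pvDiffWitness_array_key_traversal_py) = pvDiffWitnessOut_array_key_traversal_py.2 ∧ pvDiffWitnessOut_array_key_traversal_py.1 ≠ pvDiffWitnessOut_array_key_traversal_py.2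
def Claim_exact_array_key_traversal_py : Prop := ∀ (array_shape : List Int), Dom_array_key_traversal_py array_shape → Pre_array_key_traversal_py array_shape → D_array_key_traversal_py array_shape → array_key_traversal_py array_shape ≠ array_key_traversal_py_alt array_shape

-- ===== LEMMAS AND PROOFS =====

-- the mathematical digit expansion (shape given reversed, least-significant first)
def pvDigitsR : List Int → Int → List Int
  | [], _ => []
  | s :: rest, i => pvDigitsR rest (i / s) ++ [i % s]

lemma pvFoldlMul (l : List Int) : ∀ a : Int, l.foldl (· * ·) a = a * l.prod := by
  induction l with
  | nil => simp
  | cons b rest ih => intro a; simp [List.foldl_cons, ih, List.prod_cons, mul_assoc]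

lemma pvReduceMul_eq_prod (sh : List Int) (h : sh ≠ []) : pvReduceMul sh = sh.prod := by
  cases sh with
  | nil => exact absurd rfl h
  | cons a rest => simp [pvReduceMul, pvFoldlMul, List.prod_cons]

lemma pvDigitsR_zero (l : List Int) (h : ∀ x ∈ l, 0 < x) :
    pvDigitsR l 0 = List.replicate l.length 0 := by
  induction l with
  | nil => rfl
  | cons s rest ih =>
    have hs : 0 < s := h s (by simp)
    have hr : pvDigitsR rest 0 = List.replicate rest.length 0 :=
      ih (fun x hx => h x (by simp [hx]))
    simp [pvDigitsR, hr, List.replicate_succ' (n := rest.length)]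

lemma pvGetD_replicate_append : ∀ (k : Nat) (xs : List Int) (j : Nat) (d : Int),
    (List.replicate k (0:Int) ++ xs).getD (k + j) d = xs.getD j d := by
  intro k
  induction k with
  | zero => intro xs j d; simp
  | succ k ih =>
    intro xs j d
    simp only [List.replicate_succ, List.cons_append]
    have : k + 1 + j = (k + j) + 1 := by omega
    rw [this, List.getD_cons_succ, ih]

lemma pvSet_replicate_append : ∀ (k : Nat) (xs : List Int) (j : Nat) (v : Int),
    (List.replicate k (0:Int) ++ xs).set (k + j) v = List.replicate k 0 ++ xs.set j v := by
  intro k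
  induction k with
  | zero => intro xs j v; simp
  | succ k ih =>
    intro xs j v
    simp only [List.replicate_succ, List.cons_append]
    have : k + 1 + j = (k + j) + 1 := by omega
    rw [this, List.set_cons_succ, ih]

lemma pvCarry_correct (sh : List Int) (hpos : ∀ x ∈ sh, 0 < x) :
    ∀ (r0 : Nat) (c : Int) (tail : List Int),
      r0 + 1 + tail.length = sh.length →
      0 ≤ c → c < (sh.take (r0 + 1)).prod →
      pvCarry sh (List.replicate r0 0 ++ c :: tail) (PySem.List.pyRange (r0 : Int) (-1) (-1))
        = pvDigitsR ((sh.take (r0 + 1)).reverse) c ++ tail := by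
  intro r0
  induction r0 with
  | zero =>
    intro c tail hlen hc0 hcp
    cases sh with
    | nil => simp at hlen
    | cons s0 rest =>
      have hs0 : 0 < s0 := hpos s0 (by simp)
      have hcs : c < s0 := by simpa using hcp
      have hr : PySem.List.pyRange (0:Int) (-1) (-1) = [0] := by
        rw [PySem.List.pyRange_neg_one_cons (by norm_num)]
        simp [PySem.List.pyRange_neg_one_eq_nil (le_refl (-1))]
      rw [Nat.cast_zero, hr]
      simp only [List.replicate, List.nil_append]
      have hcond : ¬ (PySem.List.pyGetD (s0 :: rest) (0:Int) 0 ≤ PySem.List.pyGetD (c :: tail) (0:Int) 0) := by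
        simp [PySem.List.pyGetD_zero_cons, not_le.mpr hcs]
      rw [pvCarry, if_neg hcond]
      have : c % s0 = c := Int.emod_eq_of_lt hc0 hcs
      simp [pvDigitsR, this]
  | succ r0 ih =>
    intro c tail hlen hc0 hcp
    have hidx : r0 + 1 < sh.length := by omega
    have hs : 0 < sh[r0+1] := hpos _ (List.getElem_mem hidx)
    have htake : sh.take (r0+1+1) = sh.take (r0+1) ++ [sh[r0+1]] := by
      rw [List.take_succ, List.getElem?_eq_getElem hidx]
      rfl
    have hP : 0 < (sh.take (r0+1)).prod :=
      List.prod_pos (fun x hx => hpos x (List.mem_of_mem_take hx))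
    have hcP : c < (sh.take (r0+1)).prod * sh[r0+1] := by
      rw [htake, List.prod_append, List.prod_singleton] at hcp; exact hcp
    have hrange : PySem.List.pyRange ((r0+1 : Nat) : Int) (-1) (-1)
        = ((r0+1:Nat):Int) :: PySem.List.pyRange ((r0:Nat):Int) (-1) (-1) := by
      rw [PySem.List.pyRange_neg_one_cons (by push_cast; omega)]
      congr 1
      push_cast; ring
    rw [hrange]
    have hkey_get : PySem.List.pyGetD (List.replicate (r0+1) (0:Int) ++ c :: tail) ((r0+1:Nat):Int) 0 = c := by
      rw [PySem.List.pyGetD_natCast]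
      have : (List.replicate (r0+1) (0:Int) ++ c :: tail).getD (r0+1) 0 = (c :: tail).getD 0 0 :=
        by simpa using pvGetD_replicate_append (r0+1) (c :: tail) 0 0
      simpa using this
    have hsh_get : PySem.List.pyGetD sh ((r0+1:Nat):Int) 0 = sh[r0+1] := by
      rw [PySem.List.pyGetD_natCast]
      simp [List.getD_eq_getElem?_getD, List.getElem?_eq_getElem hidx]
    have hrev : (sh.take (r0+1+1)).reverse = sh[r0+1] :: (sh.take (r0+1)).reverse := by
      rw [htake]; simp
    by_cases hbr : sh[r0+1] ≤ c
    · -- carry step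
      rw [pvCarry]
      simp only [hkey_get, hsh_get]
      rw [if_pos hbr]
      have hcast : ((r0+1:Nat):Int) - 1 = ((r0:Nat):Int) := by push_cast; ring
      have hflo : PySem.Int.floordiv c sh[r0+1] = c / sh[r0+1] :=
        PySem.Int.floordiv_eq_ediv_of_pos hs
      have hkey1 : PySem.List.pySetD (List.replicate (r0+1) (0:Int) ++ c :: tail)
          (((r0+1:Nat):Int) - 1) (c / sh[r0+1])
          = List.replicate r0 (0:Int) ++ (c / sh[r0+1]) :: c :: tail := by
        rw [hcast, PySem.List.pySetD_natCast]
        have h1 : List.replicate (r0+1) (0:Int) ++ c :: tail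
            = List.replicate r0 (0:Int) ++ (0 :: c :: tail) := by
          rw [List.replicate_succ' (n := r0)]; simp
        rw [h1]
        simpa using pvSet_replicate_append r0 (0 :: c :: tail) 0 (c / sh[r0+1])
      have hkey1_get : PySem.List.pyGetD (List.replicate r0 (0:Int) ++ (c / sh[r0+1]) :: c :: tail) ((r0+1:Nat):Int) 0 = c := by
        rw [PySem.List.pyGetD_natCast]
        simpa using pvGetD_replicate_append r0 ((c / sh[r0+1]) :: c :: tail) 1 0
      have hmod : PySem.Int.mod c sh[r0+1] = c % sh[r0+1] :=
        PySem.Int.mod_eq_emod_of_pos hs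
      have hkey2 : PySem.List.pySetD (List.replicate r0 (0:Int) ++ (c / sh[r0+1]) :: c :: tail)
          ((r0+1:Nat):Int) (c % sh[r0+1])
          = List.replicate r0 (0:Int) ++ (c / sh[r0+1]) :: (c % sh[r0+1]) :: tail := by
        rw [PySem.List.pySetD_natCast]
        simpa using pvSet_replicate_append r0 ((c / sh[r0+1]) :: c :: tail) 1 (c % sh[r0+1])
      rw [hflo, hkey1, hkey1_get, hmod, hkey2]
      have hdiv0 : 0 ≤ c / sh[r0+1] := Int.ediv_nonneg hc0 hs.le
      have hdivlt : c / sh[r0+1] < (sh.take (r0+1)).prod :=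
        (Int.ediv_lt_iff_lt_mul hs).mpr hcP
      have hlen' : r0 + 1 + ((c % sh[r0+1]) :: tail).length = sh.length := by
        simp at hlen ⊢; omega
      rw [ih (c / sh[r0+1]) ((c % sh[r0+1]) :: tail) hlen' hdiv0 hdivlt, hrev]
      simp [pvDigitsR]
    · -- break
      rw [pvCarry, if_neg (by rw [hkey_get, hsh_get]; exact hbr)]
      have hlt : c < sh[r0+1] := not_le.mp hbr
      have hd0 : c / sh[r0+1] = 0 := Int.ediv_eq_zero_of_lt hc0 hlt
      have hm : c % sh[r0+1] = c := Int.emod_eq_of_lt hc0 hlt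
      have hzero : pvDigitsR ((sh.take (r0+1)).reverse) 0
          = List.replicate (r0+1) (0:Int) := by
        have hlen1 : ((sh.take (r0+1)).reverse).length = r0 + 1 := by
          simp; omega
        rw [pvDigitsR_zero _ (fun x hx => hpos x (List.mem_of_mem_take (List.mem_reverse.mp hx))), hlen1]
      rw [hrev]
      simp [pvDigitsR, hd0, hm, hzero]

lemma pvDecode_eq (sh : List Int) (hpos : ∀ x ∈ sh, 0 < x) (hne : sh ≠ [])
    (i : Int) (h0 : 0 ≤ i) (hi : i < sh.prod) :
    pvCarry sh (PySem.List.pySetD (List.replicate sh.length 0) (-1) i)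
        (PySem.List.pyRange ((sh.length : Int) - 1) (-1) (-1))
      = pvDigitsR sh.reverse i := by
  have hn : 1 ≤ sh.length := List.length_pos_iff.mpr hne
  have hset : PySem.List.pySetD (List.replicate sh.length (0:Int)) (-1) i
      = List.replicate (sh.length - 1) (0:Int) ++ [i] := by
    have hidx : PySem.List.pyIdx? (List.replicate sh.length (0:Int)).length (-1)
        = some (sh.length - 1) := by
      simp only [PySem.List.pyIdx?, List.length_replicate]
      rw [if_neg (by norm_num), if_pos (by omega)]
      norm_num
    simp only [PySem.List.pySetD, PySem.List.pySet?, hidx, Option.map_some, Option.getD_some]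
    obtain ⟨k, hk⟩ : ∃ k, sh.length = k + 1 := ⟨sh.length - 1, by omega⟩
    rw [hk]
    simp only [Nat.add_sub_cancel]
    rw [List.replicate_succ' (n := k)]
    simpa using pvSet_replicate_append k [(0:Int)] 0 i
  have hcast : (sh.length : Int) - 1 = ((sh.length - 1 : Nat) : Int) := by push_cast [hn]; ring
  rw [hset, hcast]
  have htake : sh.take (sh.length - 1 + 1) = sh := by
    rw [show sh.length - 1 + 1 = sh.length by omega]
    exact List.take_length
  have := pvCarry_correct sh hpos (sh.length - 1) i [] (by simp; omega) h0
    (by rw [htake]; exact hi)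
  rw [htake] at this
  simpa using this

lemma pvRange_mul_split (s : Int) (hs : 0 < s) : ∀ (m : Nat),
    PySem.List.pyRange 0 ((m : Int) * s) 1
      = (PySem.List.pyRange 0 (m : Int) 1).flatMap
          (fun j => (PySem.List.pyRange 0 s 1).map (fun v => j * s + v)) := by
  intro m
  induction m with
  | zero =>
    simp [PySem.List.pyRange_one_eq_nil (le_refl (0:Int))]
  | succ m ih =>
    have hms : ((m + 1 : Nat) : Int) * s = (m : Int) * s + s := by push_cast; ring
    have h0m : (0:Int) ≤ (m : Int) * s := by positivity
    rw [hms, PySem.List.pyRange_one_append 0 ((m:Int)*s) ((m:Int)*s + s) h0m (by omega), ih]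
    have hr : ((m + 1 : Nat) : Int) = (m : Int) + 1 := by push_cast; ring
    rw [hr, PySem.List.pyRange_one_succ_right (by positivity), List.flatMap_append]
    congr 1
    have hsing : ([(m:Int)]).flatMap (fun j => (PySem.List.pyRange 0 s 1).map (fun v => j * s + v))
        = (PySem.List.pyRange 0 s 1).map (fun v => (m:Int) * s + v) := by simp
    rw [hsing, PySem.List.pyRange_one ((m:Int)*s) ((m:Int)*s + s), PySem.List.pyRange_one 0 s]
    simp [List.map_map, Function.comp]

lemma pvFlatMap_congr {α β : Type} {l : List α} {f g : α → List β}
    (h : ∀ a ∈ l, f a = g a) : l.flatMap f = l.flatMap g := by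
  induction l with
  | nil => rfl
  | cons a rest ih =>
    simp only [List.flatMap_cons, h a (by simp), ih (fun x hx => h x (by simp [hx]))]

lemma pvMain_pos (sh : List Int) (hpos : ∀ x ∈ sh, 0 < x) :
    (PySem.List.pyRange 0 sh.prod 1).map (fun i => pvDigitsR sh.reverse i)
      = sh.foldl pvExtend [[]] := by
  induction sh using List.reverseRecOn with
  | nil =>
    have h1 : PySem.List.pyRange 0 1 1 = [0] := by
      simpa using PySem.List.pyRange_one_singleton (a := (0:Int))
    simp [h1, pvDigitsR]
  | append_singleton d s ih =>
    have hd : ∀ x ∈ d, 0 < x := fun x hx => hpos x (by simp [hx])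
    have hs : 0 < s := hpos s (by simp)
    have hP : 0 < d.prod := List.prod_pos hd
    have hm : ((d.prod.toNat : Nat) : Int) = d.prod := Int.toNat_of_nonneg hP.le
    have hprod : (d ++ [s]).prod = ((d.prod.toNat : Nat) : Int) * s := by
      rw [hm]; simp
    rw [hprod, pvRange_mul_split s hs d.prod.toNat, hm, List.map_flatMap]
    rw [List.foldl_append, ← ih hd]
    show _ = pvExtend ((PySem.List.pyRange 0 d.prod 1).map (fun i => pvDigitsR d.reverse i)) s
    unfold pvExtend
    rw [List.flatMap_map]
    apply pvFlatMap_congr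
    intro j hj
    obtain ⟨hj0, hjP⟩ := (PySem.List.mem_pyRange_one).mp hj
    rw [List.map_map]
    apply List.map_congr_left
    intro v hv
    obtain ⟨hv0, hvs⟩ := (PySem.List.mem_pyRange_one).mp hv
    have hrev : (d ++ [s]).reverse = s :: d.reverse := by simp
    have hdiv : (j * s + v) / s = j := by
      rw [add_comm, Int.add_mul_ediv_right v j (ne_of_gt hs), Int.ediv_eq_zero_of_lt hv0 hvs,
        zero_add]
    have hmod : (j * s + v) % s = v := by
      rw [add_comm, mul_comm, Int.add_mul_emod_self_left, Int.emod_eq_of_lt hv0 hvs]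
    simp [hrev, pvDigitsR, hdiv, hmod]

-- ===== VERDICT (by name: the statement is the Claim_ definition above) =====
theorem array_key_traversal_py_spec : Claim_unchanged_array_key_traversal_py := by
  intro sh _ hpre
  unfold Spec_array_key_traversal_py
  intro hnd
  unfold Pre_array_key_traversal_py at hpre
  unfold D_array_key_traversal_py at hnd
  by_cases hneg : ∃ x ∈ sh, x ≤ 0
  · have hB : array_key_traversal_py_alt sh = [] := by
      unfold array_key_traversal_py_alt
      rw [if_pos (by obtain ⟨x, hx, hx0⟩ := hneg; simp only [List.any_eq_true,
        decide_eq_true_eq]; exact ⟨x, hx, hx0⟩)]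
    have hscale : pvReduceMul sh ≤ 0 := by
      rw [pvReduceMul_eq_prod sh hpre]
      by_cases hstrict : ∃ x ∈ sh, x < 0
      · exact not_lt.mp (not_and.mp hnd hstrict)
      · push_neg at hstrict
        obtain ⟨x, hx, hx0⟩ := hneg
        have hx0' : x = 0 := le_antisymm hx0 (hstrict x hx)
        exact le_of_eq (List.prod_eq_zero (hx0' ▸ hx))
    have hA : array_key_traversal_py sh = [] := by
      simp [array_key_traversal_py, PySem.List.pyRange_one_eq_nil hscale]
    rw [hA, hB]
  · push_neg at hneg
    show array_key_traversal_py sh = array_key_traversal_py_alt sh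
    unfold array_key_traversal_py array_key_traversal_py_alt
    have hguard : ¬ (sh.any (fun size => size ≤ 0) = true) := by
      simp only [List.any_eq_true, decide_eq_true_eq, not_exists, not_and, not_le]
      exact hneg
    rw [if_neg hguard]
    rw [pvReduceMul_eq_prod sh hpre, ← pvMain_pos sh hneg]
    apply List.map_congr_left
    intro i hi
    obtain ⟨hi0, hilt⟩ := (PySem.List.mem_pyRange_one).mp hi
    exact pvDecode_eq sh hneg hpre i hi0 hilt

theorem array_key_traversal_py_changed : Claim_changed_array_key_traversal_py := by
  unfold Claim_changed_array_key_traversal_py; decide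

theorem array_key_traversal_py_tight : Claim_exact_array_key_traversal_py := by
  intro sh _ hpre hd heq
  obtain ⟨⟨x, hx, hxneg⟩, hprod⟩ := hd
  have hB : array_key_traversal_py_alt sh = [] := by
    unfold array_key_traversal_py_alt
    rw [if_pos (by simp only [List.any_eq_true, decide_eq_true_eq]; exact ⟨x, hx, hxneg.le⟩)]
  rw [hB] at heq
  have hlen := congrArg List.length heq
  simp [array_key_traversal_py, pvReduceMul_eq_prod sh hpre,
    PySem.List.length_pyRange_one] at hlen
  omega
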